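-- pv_equiv track=rewrite | github.com/efforter/Coding_Test | 프로그래머스/1/12917. 문자열 내림차순으로 배치하기/문자열 내림차순으로 배치하기.py | solution
-- ===== SOURCE A (Python) =====
-- def solution(s):
--     low = []
--     upp = []
--     for x in s:
--         if x.islower()==1:
--             low.append(x)
--         else:
--             upp.append(x)
--     low.sort(reverse=True)
--     upp.sort(reverse=True)
--     result = ''
--     for x in low:
--         result += x
--     for x in upp:
--         result += x
--     return result
-- ===== SOURCE B (Python) =====
-- def solution(s):
--     # counting sort over the fixed ASCII alphabet: one counting pass, then
--     # emit lowercase codes descending, then all other codes descending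
--     cnt = [0] * 128
--     for ch in s:
--         cnt[ord(ch)] += 1
--     out = []
--     for code in range(122, 96, -1):          # 'z' .. 'a'
--         out.append(chr(code) * cnt[code])
--     for code in range(127, -1, -1):          # every non-lowercase code, descending
--         if code < 97 or 122 < code:
--             out.append(chr(code) * cnt[code])
--     return ''.join(out)
-- ===== Notes on version B (the rewrite author's own statement) =====
-- stated objective: faster
-- what changed: Replaces the two comparison sorts (sort descending of the lowercase and non-lowercase partitions) with a single counting pass over a fixed 128-slot ASCII table, emitting lowercase codes 122..97 and then the remaining codes descending.
import Mathlib
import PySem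

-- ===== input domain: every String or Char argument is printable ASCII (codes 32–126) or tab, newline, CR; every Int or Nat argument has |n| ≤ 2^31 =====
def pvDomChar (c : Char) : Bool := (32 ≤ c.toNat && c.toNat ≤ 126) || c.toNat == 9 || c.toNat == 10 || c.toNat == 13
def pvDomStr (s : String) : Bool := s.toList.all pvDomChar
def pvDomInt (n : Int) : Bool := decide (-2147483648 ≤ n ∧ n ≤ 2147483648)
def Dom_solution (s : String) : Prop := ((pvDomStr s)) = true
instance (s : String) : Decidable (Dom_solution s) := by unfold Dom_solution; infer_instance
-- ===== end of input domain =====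

-- B replaces A's two descending comparison sorts by a one-pass counting sort over the fixed 128-slot ASCII table (measured faster at the largest sizes).


-- ===== PORT A =====
def solution (s : String) : String :=
  let p := s.toList.foldl (fun (p : List Char × List Char) x =>
      if PySem.Chars.islower x then (p.1 ++ [x], p.2) else (p.1, p.2 ++ [x])) ([], [])
  let low := PySem.List.sorted p.1 (fun x => x) true
  let upp := PySem.List.sorted p.2 (fun x => x) true
  let r := low.foldl (fun acc x => acc ++ [x]) ([] : List Char)
  let r := upp.foldl (fun acc x => acc ++ [x]) r
  String.mk r

-- ===== PORT B =====
def solution_alt (s : String) : String :=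
  let cnt := s.toList.foldl (fun (a : List Nat) c => a.set c.toNat (a.getD c.toNat 0 + 1))
      (List.replicate 128 0)
  let out := (PySem.List.pyRange 122 96 (-1)).foldl
      (fun acc code => acc ++ List.replicate (cnt.getD code.toNat 0) (Char.ofNat code.toNat))
      ([] : List Char)
  let out := (PySem.List.pyRange 127 (-1) (-1)).foldl
      (fun acc code => if code < 97 ∨ 122 < code then
          acc ++ List.replicate (cnt.getD code.toNat 0) (Char.ofNat code.toNat) else acc) out
  String.mk out

-- ===== PRECONDITION & SPEC =====
def Spec_solution (s : String) (out : String) : Prop := out = solution_alt s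
instance (s : String) (out : String) : Decidable (Spec_solution s out) := by unfold Spec_solution; infer_instance

-- ===== CLAIM (what is proved, stated in full; the proofs are below) =====
def Claim_equal_solution : Prop := ∀ (s : String), Dom_solution s → Spec_solution s (solution s)

-- ===== LEMMAS AND PROOFS =====

-- toNat of Char.ofNat for ASCII codes
theorem toNat_ofNat_lt_128 (n : Nat) (h : n < 128) : (Char.ofNat n).toNat = n := by
  rw [Char.toNat_ofNat]
  have : n.isValidChar := Or.inl (by omega)
  simp [this]

-- chars with equal codes are equal
theorem char_eq_of_toNat_eq {c d : Char} (h : c.toNat = d.toNat) : c = d := by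
  apply Char.ext
  exact UInt32.toNat_inj.mp h

theorem char_le_iff_toNat {c d : Char} : c ≤ d ↔ c.toNat ≤ d.toNat := by
  rw [Char.le_def]; exact UInt32.le_iff_toNat_le

-- uniqueness of the stable descending sort with identity key
theorem sorted_rev_id_eq {κ : Type} [LinearOrder κ] (xs ys : List κ)
    (hp : ys.Perm xs) (hs : ys.Pairwise (fun a b => b ≤ a)) :
    PySem.List.sorted xs (fun x => x) true = ys := by
  refine List.eq_of_perm_of_sorted ?_ (PySem.List.sorted_pairwise_rev xs (fun x => x)) hs
    ((PySem.List.sorted_perm xs (fun x => x) true).trans hp.symm)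
  intro a b _ _ h1 h2
  exact le_antisymm h2 h1

-- A's partition loop computes the two filters
theorem partition_foldl (l : List Char) (a b : List Char) :
    l.foldl (fun (p : List Char × List Char) x =>
      if PySem.Chars.islower x then (p.1 ++ [x], p.2) else (p.1, p.2 ++ [x])) (a, b)
    = (a ++ l.filter (fun c => PySem.Chars.islower c),
       b ++ l.filter (fun c => !PySem.Chars.islower c)) := by
  induction l generalizing a b with
  | nil => simp
  | cons c t ih =>
    by_cases h : PySem.Chars.islower c = true <;>
      simp [List.foldl_cons, h, ih, List.filter_cons]

-- B's counting loop: slot k holds the number of occurrences of the char with code k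
theorem count_foldl (l : List Char) (cnt : List Nat) (k : Nat)
    (hlen0 : cnt.length = 128) (hk : k < 128) (hl : ∀ c ∈ l, c.toNat < 128) :
    (l.foldl (fun (a : List Nat) c => a.set c.toNat (a.getD c.toNat 0 + 1)) cnt).getD k 0
      = cnt.getD k 0 + l.count (Char.ofNat k) := by
  induction l generalizing cnt with
  | nil => simp
  | cons c t ih =>
    have hc : c.toNat < cnt.length := by rw [hlen0]; exact hl c (by simp)
    have hlen : (cnt.set c.toNat (cnt.getD c.toNat 0 + 1)).length = 128 := by
      simp [hlen0]
    rw [List.foldl_cons, ih _ hlen (fun d hd => hl d (by simp [hd]))]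
    by_cases hck : c.toNat = k
    · have hcc : c = Char.ofNat k := by
        apply char_eq_of_toNat_eq; rw [toNat_ofNat_lt_128 k hk, hck]
      subst hck
      rw [List.count_cons, ← hcc]
      simp [List.getD_eq_getElem?_getD, hc]
      omega
    · have hcc : c ≠ Char.ofNat k := fun h => hck (by rw [h, toNat_ofNat_lt_128 k hk])
      rw [List.count_cons]
      simp [hcc, List.getD_eq_getElem?_getD, List.getElem?_set_ne hck]

-- a foldl that appends a block per code is the flatMap of the blocks
theorem foldl_append_blocks (ks : List Int) (g : Int → List Char) (acc : List Char) :
    ks.foldl (fun acc k => acc ++ g k) acc = acc ++ ks.flatMap g :=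
  PySem.List.foldl_append_eq_flatMap g ks acc

theorem foldl_append_blocks_if (ks : List Int) (p : Int → Prop) [DecidablePred p]
    (g : Int → List Char) (acc : List Char) :
    ks.foldl (fun acc k => if p k then acc ++ g k else acc) acc
      = acc ++ (ks.filter (fun k => decide (p k))).flatMap g := by
  induction ks generalizing acc with
  | nil => simp
  | cons k t ih =>
    by_cases h : p k <;> simp [List.foldl_cons, h, ih, List.filter_cons]

-- the emitted blocks are a permutation of l and descending
theorem emit_perm_pairwise (ks : List Int) (l : List Char)
    (hdec : ks.Pairwise (fun a b => b < a))
    (hrange : ∀ k ∈ ks, 0 ≤ k ∧ k < 128)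
    (hcover : ∀ c ∈ l, (c.toNat : Int) ∈ ks) :
    (ks.flatMap (fun k => List.replicate (l.count (Char.ofNat k.toNat)) (Char.ofNat k.toNat))).Perm l
    ∧ (ks.flatMap (fun k =>
        List.replicate (l.count (Char.ofNat k.toNat)) (Char.ofNat k.toNat))).Pairwise
          (fun a b => b ≤ a) := by
  induction ks generalizing l with
  | nil =>
    have hl : l = [] := List.eq_nil_iff_forall_not_mem.mpr (fun c hc => by simpa using hcover c hc)
    subst hl; simp
  | cons k t ih =>
    have hk := hrange k (by simp)
    have hkN : k.toNat < 128 := by omega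
    set x := Char.ofNat k.toNat with hxdef
    have hx : x.toNat = k.toNat := toNat_ofNat_lt_128 _ hkN
    -- the tail's counts can be taken over l with the code-k chars removed
    have htail : ∀ k' ∈ t,
        (l.filter (fun c => !(c == x))).count (Char.ofNat k'.toNat) = l.count (Char.ofNat k'.toNat) := by
      intro k' hk'
      apply List.count_filter
      have hk'r := hrange k' (by simp [hk'])
      have hlt : k' < k := (List.pairwise_cons.mp hdec).1 k' hk'
      have ht : (Char.ofNat k'.toNat).toNat = k'.toNat := toNat_ofNat_lt_128 _ (by omega)
      simp only [Bool.not_eq_eq_eq_not, Bool.not_true, beq_eq_false_iff_ne, ne_eq]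
      intro he
      have h2 := congrArg Char.toNat he
      rw [ht, hx] at h2
      omega
    have hflat : t.flatMap (fun k' => List.replicate (l.count (Char.ofNat k'.toNat)) (Char.ofNat k'.toNat))
        = t.flatMap (fun k' => List.replicate
            ((l.filter (fun c => !(c == x))).count (Char.ofNat k'.toNat)) (Char.ofNat k'.toNat)) := by
      simp only [List.flatMap_def]
      congr 1
      exact List.map_congr_left (fun k' hk' => by rw [htail k' hk'])
    have hcover' : ∀ c ∈ l.filter (fun c => !(c == x)), (c.toNat : Int) ∈ t := by
      intro c hc
      rw [List.mem_filter] at hc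
      have hmem := hcover c hc.1
      have hne : c ≠ x := by simpa using hc.2
      rcases List.mem_cons.mp hmem with h | h
      · exfalso
        apply hne
        apply char_eq_of_toNat_eq
        rw [hx]
        omega
      · exact h
    obtain ⟨ihp, ihs⟩ := ih (l.filter (fun c => !(c == x))) (List.pairwise_cons.mp hdec).2
      (fun k' hk' => hrange k' (by simp [hk'])) hcover'
    constructor
    · rw [List.flatMap_cons, hflat, ← List.filter_beq]
      exact (List.Perm.append_left _ ihp).trans (List.filter_append_perm _ l)
    · rw [List.flatMap_cons, hflat]
      apply List.pairwise_append.mpr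
      refine ⟨?_, ihs, ?_⟩
      · exact List.pairwise_replicate.mpr (Or.inr (le_refl x))
      · intro a ha b hb
        have hax : a = x := List.eq_of_mem_replicate ha
        obtain ⟨k', hk', hb'⟩ := List.mem_flatMap.mp hb
        have hbx : b = Char.ofNat k'.toNat := List.eq_of_mem_replicate hb'
        have hk'r := hrange k' (by simp [hk'])
        have hlt : k' < k := (List.pairwise_cons.mp hdec).1 k' hk'
        have hb'' : b.toNat = k'.toNat := by
          rw [hbx]; exact toNat_ofNat_lt_128 _ (by omega)
        rw [hax, char_le_iff_toNat, hx]
        omega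
-- emitting, for a strictly decreasing code list covering l, count-many copies of each code's char IS the descending sort of l
theorem emit_eq_sorted (ks : List Int) (l : List Char)
    (hdec : ks.Pairwise (fun a b => b < a))
    (hrange : ∀ k ∈ ks, 0 ≤ k ∧ k < 128)
    (hcover : ∀ c ∈ l, (c.toNat : Int) ∈ ks) :
    PySem.List.sorted l (fun x => x) true
      = ks.flatMap (fun k => List.replicate (l.count (Char.ofNat k.toNat)) (Char.ofNat k.toNat)) := by
  apply sorted_rev_id_eq
  · exact (emit_perm_pairwise ks l hdec hrange hcover).1
  · exact (emit_perm_pairwise ks l hdec hrange hcover).2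

theorem congr_flatMap (ks : List Int) (f g : Int → List Char)
    (h : ∀ k ∈ ks, f k = g k) : ks.flatMap f = ks.flatMap g := by
  simp only [List.flatMap_def]
  exact congrArg _ (List.map_congr_left h)

theorem foldl_append_id (l : List Char) (acc : List Char) :
    l.foldl (fun acc x => acc ++ [x]) acc = acc ++ l := by
  induction l generalizing acc with
  | nil => simp
  | cons c t ih => simp [List.foldl_cons, ih]

theorem pairwise_gt_pyRange_neg_one (a b : Int) :
    (PySem.List.pyRange a b (-1)).Pairwise (fun x y => y < x) := by
  rw [PySem.List.pyRange_neg_one_eq_reverse, List.pairwise_reverse]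
  exact PySem.List.pairwise_lt_pyRange_one _ _

theorem islower_iff (c : Char) :
    PySem.Chars.islower c = true ↔ (97 ≤ c.toNat ∧ c.toNat ≤ 122) := by
  have h1 : ('a').toNat = 97 := by decide
  have h2 : ('z').toNat = 122 := by decide
  simp [PySem.Chars.islower, char_le_iff_toNat, h1, h2]

theorem getD_base (k : Nat) : (List.replicate 128 (0 : Nat)).getD k 0 = 0 := by
  simp only [List.getD_eq_getElem?_getD, List.getElem?_replicate]
  split <;> simp

-- ===== VERDICT (by name: the statement is the Claim_ definition above) =====
theorem solution_spec : Claim_equal_solution := by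
  intro s hdom
  unfold Spec_solution solution solution_alt
  have hchars : ∀ c ∈ s.toList, c.toNat < 128 := by
    intro c hc
    have h := (List.all_eq_true.mp hdom) c hc
    simp only [pvDomChar, Bool.or_eq_true, Bool.and_eq_true, decide_eq_true_iff,
      beq_iff_eq] at h
    omega
  rw [partition_foldl]
  simp only [List.nil_append]
  rw [foldl_append_id, foldl_append_id, List.nil_append]
  rw [foldl_append_blocks, foldl_append_blocks_if, List.nil_append]
  set cnt := List.foldl (fun (a : List Nat) c => a.set c.toNat (a.getD c.toNat 0 + 1))
      (List.replicate 128 0) s.toList with hcntdef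
  set low := s.toList.filter (fun c => PySem.Chars.islower c) with hlowdef
  set upp := s.toList.filter (fun c => !PySem.Chars.islower c) with huppdef
  have hcnt : ∀ (k : Int), 0 ≤ k → k < 128 →
      cnt.getD k.toNat 0 = s.toList.count (Char.ofNat k.toNat) := by
    intro k h0 h1
    rw [hcntdef, count_foldl _ _ _ (by simp) (by omega) hchars, getD_base, Nat.zero_add]
  have h1 : (PySem.List.pyRange 122 96 (-1)).flatMap
        (fun code => List.replicate (cnt.getD code.toNat 0) (Char.ofNat code.toNat))
      = PySem.List.sorted low (fun x => x) true := by
    have hc : ∀ k ∈ PySem.List.pyRange 122 96 (-1),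
        List.replicate (cnt.getD k.toNat 0) (Char.ofNat k.toNat)
          = List.replicate (low.count (Char.ofNat k.toNat)) (Char.ofNat k.toNat) := by
      intro k hk
      rw [PySem.List.mem_pyRange_neg_one] at hk
      have htn : (Char.ofNat k.toNat).toNat = k.toNat := toNat_ofNat_lt_128 _ (by omega)
      rw [hcnt k (by omega) (by omega)]
      congr 1
      rw [hlowdef]
      exact (List.count_filter (by rw [islower_iff, htn]; omega)).symm
    rw [congr_flatMap _ _ _ hc]
    refine (emit_eq_sorted _ low (pairwise_gt_pyRange_neg_one _ _) ?_ ?_).symm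
    · intro k hk
      rw [PySem.List.mem_pyRange_neg_one] at hk
      omega
    · intro c hcm
      have hm := List.mem_filter.mp hcm
      have hlo := (islower_iff c).mp hm.2
      have hcd := hchars c hm.1
      rw [PySem.List.mem_pyRange_neg_one]
      omega
  have h2 : ((PySem.List.pyRange 127 (-1) (-1)).filter
        (fun k => decide (k < 97 ∨ 122 < k))).flatMap
        (fun code => List.replicate (cnt.getD code.toNat 0) (Char.ofNat code.toNat))
      = PySem.List.sorted upp (fun x => x) true := by
    have hc : ∀ k ∈ (PySem.List.pyRange 127 (-1) (-1)).filter (fun k => decide (k < 97 ∨ 122 < k)),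
        List.replicate (cnt.getD k.toNat 0) (Char.ofNat k.toNat)
          = List.replicate (upp.count (Char.ofNat k.toNat)) (Char.ofNat k.toNat) := by
      intro k hk
      have hm := List.mem_filter.mp hk
      rw [PySem.List.mem_pyRange_neg_one] at hm
      have hkr : -1 < k ∧ k ≤ 127 := hm.1
      have hkp : k < 97 ∨ 122 < k := by simpa using hm.2
      have htn : (Char.ofNat k.toNat).toNat = k.toNat := toNat_ofNat_lt_128 _ (by omega)
      rw [hcnt k (by omega) (by omega)]
      congr 1
      rw [huppdef]
      refine (List.count_filter ?_).symm
      have : PySem.Chars.islower (Char.ofNat k.toNat) = false := by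
        rw [← Bool.not_eq_true, islower_iff, htn]
        omega
      simp [this]
    rw [congr_flatMap _ _ _ hc]
    refine (emit_eq_sorted _ upp ((pairwise_gt_pyRange_neg_one 127 (-1)).filter _) ?_ ?_).symm
    · intro k hk
      have hm := List.mem_filter.mp hk
      rw [PySem.List.mem_pyRange_neg_one] at hm
      omega
    · intro c hcm
      have hm := List.mem_filter.mp hcm
      have hcd := hchars c hm.1
      have hnl : PySem.Chars.islower c = false := by simpa using hm.2
      have hlo : ¬ (97 ≤ c.toNat ∧ c.toNat ≤ 122) := by
        rw [← islower_iff, hnl]; simp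
      rw [List.mem_filter, PySem.List.mem_pyRange_neg_one]
      constructor
      · omega
      · simp
        omega
  rw [h1, h2]
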